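-- pv_equiv track=rewrite | github.com/dajacoding/py_puzzle_solver | py_puzzle.py | reihenBelegt
-- ===== SOURCE A (Python) =====
-- def reihenBelegt(belegteFelder):
--     noneIndex = belegteFelder.index(None)
--     # reihenLaenge = [5, 6, 7, 8, 9, 8, 7, 6, 5]
--     reihenLaengeAddiert = [5, 11, 18, 26, 35, 43, 50, 56, 61]
--     # anzahlBelegteFelder = len([b for b in belegteFelder[:-1] if b != None])
--     rl = 0
--     for e, r in enumerate(reihenLaengeAddiert):
--         if r > noneIndex:
--             rl = e - 3
--             break
--     if rl >= 0:
--         for b in belegteFelder[:reihenLaengeAddiert[rl]]: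
--             if b == None:
--                 return False
--     return True
-- ===== SOURCE B (Python) =====
-- def reihenBelegt(belegteFelder):
--     noneIndex = belegteFelder.index(None)
--     reihenLaengeAddiert = [5, 11, 18, 26, 35, 43, 50, 56, 61]
--     row = sum(1 for r in reihenLaengeAddiert if r <= noneIndex)
--     rl = row - 3
--     return rl < 0 or noneIndex >= reihenLaengeAddiert[rl]
-- ===== Notes on version B (the rewrite author's own statement) =====
-- stated objective: simpler
-- what changed: B replaces A's break-loop over enumerate plus the inner prefix scan for None with a count of cumulative bounds not exceeding the first-None index and one arithmetic comparison against the bound three rows back (valid because index(None) is the first None).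
import Mathlib
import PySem

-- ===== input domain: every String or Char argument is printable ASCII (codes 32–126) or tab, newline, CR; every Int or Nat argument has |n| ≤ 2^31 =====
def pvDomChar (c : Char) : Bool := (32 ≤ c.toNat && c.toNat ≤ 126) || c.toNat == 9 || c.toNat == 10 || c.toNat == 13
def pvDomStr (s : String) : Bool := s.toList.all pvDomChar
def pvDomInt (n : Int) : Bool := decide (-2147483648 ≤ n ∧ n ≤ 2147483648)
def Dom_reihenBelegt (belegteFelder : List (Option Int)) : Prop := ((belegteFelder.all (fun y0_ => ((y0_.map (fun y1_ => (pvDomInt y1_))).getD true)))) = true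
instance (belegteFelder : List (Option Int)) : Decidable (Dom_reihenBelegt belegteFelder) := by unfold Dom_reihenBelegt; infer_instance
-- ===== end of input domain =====

-- B replaces A's break-loop + inner prefix None-scan by counting cumulative bounds ≤ the first-None index and one comparison; objective: simpler.

-- ===== PORT A =====
-- the 'for e, r in enumerate(...): if r > noneIndex: rl = e - 3; break' loop; falling off the end leaves rl = 0
def pvFindRl : List Int → Int → Int → Int
  | [], _, _ => 0
  | r :: rest, noneIndex, e => if r > noneIndex then e - 3 else pvFindRl rest noneIndex (e + 1)

-- the 'for b in belegteFelder[:...]: if b == None: return False' scan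
def pvScanPrefix : List (Option Int) → Bool
  | [] => true
  | b :: rest => if b = Option.none then false else pvScanPrefix rest

def reihenBelegt (belegteFelder : List (Option Int)) : Bool :=
  match PySem.List.index? belegteFelder Option.none with
  | Option.none => false  -- Python raises ValueError here; excluded by Pre_
  | some noneIndex =>
    let reihenLaengeAddiert : List Int := [5, 11, 18, 26, 35, 43, 50, 56, 61]
    let rl : Int := pvFindRl reihenLaengeAddiert (noneIndex : Int) 0
    if rl ≥ 0 then
      -- reihenLaengeAddiert[rl] is always in range when rl ≥ 0 (rl ∈ {0..5}); the getD 0 default is never used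
      pvScanPrefix (PySem.List.slice belegteFelder Option.none
        (some ((PySem.List.pyGet? reihenLaengeAddiert rl).getD 0)))
    else true

-- ===== PORT B =====
def reihenBelegt_alt (belegteFelder : List (Option Int)) : Bool :=
  match PySem.List.index? belegteFelder Option.none with
  | Option.none => false  -- Python raises ValueError here; excluded by Pre_
  | some noneIndex =>
    let reihenLaengeAddiert : List Int := [5, 11, 18, 26, 35, 43, 50, 56, 61]
    let row : Nat := (reihenLaengeAddiert.filter (fun r => r ≤ (noneIndex : Int))).length
    let rl : Int := (row : Int) - 3
    decide (rl < 0) ||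
      -- reihenLaengeAddiert[rl] is always in range when rl ≥ 0 (rl ∈ {0..6}); the getD 0 default is never used
      decide ((PySem.List.pyGet? reihenLaengeAddiert rl).getD 0 ≤ (noneIndex : Int))

-- ===== PRECONDITION & SPEC =====
-- Pre_ excludes exactly the inputs containing no None, on which both A and B raise ValueError from .index(None)
def Pre_reihenBelegt (belegteFelder : List (Option Int)) : Prop := Option.none ∈ belegteFelder
instance (belegteFelder : List (Option Int)) : Decidable (Pre_reihenBelegt belegteFelder) := by unfold Pre_reihenBelegt; infer_instance
def pvWitness_reihenBelegt : List (Option Int) := [some 1, Option.none, some 2]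

def Spec_reihenBelegt (belegteFelder : List (Option Int)) (out : Bool) : Prop := out = reihenBelegt_alt belegteFelder
instance (belegteFelder : List (Option Int)) (out : Bool) : Decidable (Spec_reihenBelegt belegteFelder out) := by unfold Spec_reihenBelegt; infer_instance

-- ===== CLAIM (what is proved, stated in full; the proofs are below) =====
def Claim_equal_reihenBelegt : Prop := ∀ (belegteFelder : List (Option Int)), Dom_reihenBelegt belegteFelder → Pre_reihenBelegt belegteFelder → Spec_reihenBelegt belegteFelder (reihenBelegt belegteFelder)

-- ===== LEMMAS AND PROOFS =====

-- pure-in-i forms of the two ports, once the first-None index i is known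
def pvAPure (i : Nat) : Bool :=
  let bounds : List Int := [5, 11, 18, 26, 35, 43, 50, 56, 61]
  let rl : Int := pvFindRl bounds (i : Int) 0
  if rl ≥ 0 then decide (((PySem.List.pyGet? bounds rl).getD 0).toNat ≤ i) else true

def pvBPure (i : Nat) : Bool :=
  let bounds : List Int := [5, 11, 18, 26, 35, 43, 50, 56, 61]
  let row : Nat := (bounds.filter (fun r => r ≤ (i : Int))).length
  let rl : Int := (row : Int) - 3
  decide (rl < 0) || decide ((PySem.List.pyGet? bounds rl).getD 0 ≤ (i : Int))

-- A's prefix scan over xs[:k] is exactly 'k ≤ first-None index'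
lemma pvScan_take : ∀ (xs : List (Option Int)) (i k : Nat),
    PySem.List.index? xs Option.none = some i →
    pvScanPrefix (xs.take k) = decide (k ≤ i) := by
  intro xs
  induction xs with
  | nil => intro i k h; rw [PySem.List.index?_eq_idxOf?] at h; simp at h
  | cons a t ih =>
    intro i k h
    by_cases ha : a = Option.none
    · subst ha
      rw [PySem.List.index?_cons_self] at h
      cases h
      cases k with
      | zero => simp [pvScanPrefix]
      | succ k' => simp [pvScanPrefix]
    · rw [PySem.List.index?_cons_of_ne t ha] at h
      obtain ⟨i', hi', rfl⟩ : ∃ i', PySem.List.index? t Option.none = some i' ∧ i = i' + 1 := by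
        cases hh : PySem.List.index? t Option.none with
        | none => rw [hh] at h; simp at h
        | some j => rw [hh] at h; simp at h; exact ⟨j, rfl, h.symm⟩
      cases k with
      | zero => simp [pvScanPrefix]
      | succ k' =>
        simp only [List.take_succ_cons, pvScanPrefix, if_neg ha, ih i' k' hi']
        simp

-- the bound A indexes in its then-branch is never negative (so slice_to applies)
lemma pvBound_nonneg (i : Nat) :
    0 ≤ (PySem.List.pyGet? ([5, 11, 18, 26, 35, 43, 50, 56, 61] : List Int)
      (pvFindRl ([5, 11, 18, 26, 35, 43, 50, 56, 61] : List Int) (i : Int) 0)).getD 0 := by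
  simp only [pvFindRl]
  split_ifs <;> decide

-- the two pure forms agree for every first-None index i
lemma pvPure_eq (i : Nat) : pvAPure i = pvBPure i := by
  rcases Nat.lt_or_ge i 61 with h | h
  · interval_cases i <;> decide
  · have h5 : ¬ ((5:Int) > i) := by omega
    have h11 : ¬ ((11:Int) > i) := by omega
    have h18 : ¬ ((18:Int) > i) := by omega
    have h26 : ¬ ((26:Int) > i) := by omega
    have h35 : ¬ ((35:Int) > i) := by omega
    have h43 : ¬ ((43:Int) > i) := by omega
    have h50 : ¬ ((50:Int) > i) := by omega
    have h56 : ¬ ((56:Int) > i) := by omega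
    have h61 : ¬ ((61:Int) > i) := by omega
    simp [pvAPure, pvBPure, pvFindRl, List.filter, h5, h11, h18, h26, h35, h43, h50, h56, h61,
      not_lt.mp h5, not_lt.mp h11, not_lt.mp h18, not_lt.mp h26, not_lt.mp h35,
      not_lt.mp h43, not_lt.mp h50, not_lt.mp h56, not_lt.mp h61,
      PySem.List.pyGet?, PySem.List.pyIdx?]
    omega

lemma pvA_eq_pure (xs : List (Option Int)) (i : Nat)
    (h : PySem.List.index? xs Option.none = some i) :
    reihenBelegt xs = pvAPure i := by
  unfold reihenBelegt pvAPure
  rw [h]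
  simp only
  rw [PySem.List.slice_to xs (pvBound_nonneg i), pvScan_take xs i _ h]

lemma pvB_eq_pure (xs : List (Option Int)) (i : Nat)
    (h : PySem.List.index? xs Option.none = some i) :
    reihenBelegt_alt xs = pvBPure i := by
  unfold reihenBelegt_alt pvBPure
  rw [h]

-- ===== VERDICT (by name: the statement is the Claim_ definition above) =====
theorem reihenBelegt_spec : Claim_equal_reihenBelegt := by
  intro xs _ hpre
  unfold Spec_reihenBelegt
  cases h : PySem.List.index? xs Option.none with
  | none => exact absurd hpre ((PySem.List.index?_eq_none_iff xs Option.none).mp h)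
  | some i => rw [pvA_eq_pure xs i h, pvB_eq_pure xs i h, pvPure_eq]
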